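-- pv_equiv track=rewrite | github.com/fseiffarth/MaxMarginSeparations | Algos.py | color_list_training
-- ===== SOURCE A (Python) =====
-- def color_list_training(Node_List, pos_points, neg_points):
--     color_list = []
--     for x in range(len(Node_List)):
--         if x in pos_points:
--             color_list.append("red")
--         elif x in neg_points:
--             color_list.append("green")
--         else:
--             color_list.append("blue")
--     return color_list
-- ===== SOURCE B (Python) =====
-- def color_list_training(Node_List, pos_points, neg_points):
--     n = len(Node_List)
--     color_list = ["blue"] * n
--     for p in neg_points:
--         if 0 <= p < n:
--             color_list[p] = "green"
--     for p in pos_points: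
--         if 0 <= p < n:
--             color_list[p] = "red"
--     return color_list
-- ===== Notes on version B (the rewrite author's own statement) =====
-- stated objective: alternative
-- what changed: Replaces the gather loop (for each index, scan pos_points then neg_points for membership) by a scatter: fill a 'blue' list once, then write 'green' at each in-range neg point and 'red' at each in-range pos point, writing red last so it wins as in A's if/elif.
import Mathlib
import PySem

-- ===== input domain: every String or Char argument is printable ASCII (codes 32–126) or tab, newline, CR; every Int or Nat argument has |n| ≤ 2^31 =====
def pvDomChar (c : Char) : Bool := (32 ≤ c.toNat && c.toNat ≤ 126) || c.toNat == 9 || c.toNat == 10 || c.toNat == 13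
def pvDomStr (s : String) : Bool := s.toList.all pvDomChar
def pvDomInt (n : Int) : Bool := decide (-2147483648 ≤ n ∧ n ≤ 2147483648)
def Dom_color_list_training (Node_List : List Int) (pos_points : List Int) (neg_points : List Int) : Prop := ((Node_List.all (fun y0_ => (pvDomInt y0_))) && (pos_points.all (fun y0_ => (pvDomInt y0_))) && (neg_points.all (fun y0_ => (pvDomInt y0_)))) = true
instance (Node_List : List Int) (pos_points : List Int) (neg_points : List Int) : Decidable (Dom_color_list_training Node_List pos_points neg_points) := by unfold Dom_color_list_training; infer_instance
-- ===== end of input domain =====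

-- B replaces A's per-index gather (a membership scan of pos/neg for every index) by a scatter:
-- fill a 'blue' list once, write 'green' at in-range neg indices, then 'red' at in-range pos indices
-- (red written last, matching A's if/elif precedence); objective: alternative decomposition.

-- ===== PORT A =====
def color_list_training (Node_List : List Int) (pos_points : List Int) (neg_points : List Int) : List String :=
  (PySem.List.pyRange 0 (Node_List.length : Int) 1).foldl
    (fun color_list x =>
      if x ∈ pos_points then color_list ++ ["red"]
      else if x ∈ neg_points then color_list ++ ["green"]
      else color_list ++ ["blue"]) []

-- ===== PORT B =====
-- in-place write color_list[p] = c guarded by 0 <= p < n, as in Source B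
def pvSetColor (l : List String) (p : Int) (c : String) : List String :=
  if 0 ≤ p ∧ p < (l.length : Int) then l.set p.toNat c else l

def color_list_training_alt (Node_List : List Int) (pos_points : List Int) (neg_points : List Int) : List String :=
  let base := List.replicate Node_List.length "blue"
  let g := neg_points.foldl (fun l p => pvSetColor l p "green") base
  pos_points.foldl (fun l p => pvSetColor l p "red") g

-- ===== PRECONDITION & SPEC =====
def Spec_color_list_training (Node_List : List Int) (pos_points : List Int) (neg_points : List Int) (out : List String) : Prop := out = color_list_training_alt Node_List pos_points neg_points
instance (Node_List : List Int) (pos_points : List Int) (neg_points : List Int) (out : List String) : Decidable (Spec_color_list_training Node_List pos_points neg_points out) := by unfold Spec_color_list_training; infer_instance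

-- ===== CLAIM (what is proved, stated in full; the proofs are below) =====
def Claim_equal_color_list_training : Prop := ∀ (Node_List : List Int) (pos_points : List Int) (neg_points : List Int), Dom_color_list_training Node_List pos_points neg_points → Spec_color_list_training Node_List pos_points neg_points (color_list_training Node_List pos_points neg_points)

-- ===== LEMMAS AND PROOFS =====

-- the common closed form both ports equal
def pvColorOf (pos_points : List Int) (neg_points : List Int) (k : Int) : String :=
  if k ∈ pos_points then "red" else if k ∈ neg_points then "green" else "blue"

theorem foldl_append_singleton {α β : Type} (l : List α) (f : α → β) (init : List β) :
    l.foldl (fun acc x => acc ++ [f x]) init = init ++ l.map f := by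
  induction l generalizing init with
  | nil => simp
  | cons a t ih => simp [ih]

theorem portA_eq_map (Node_List : List Int) (pos_points : List Int) (neg_points : List Int) :
    color_list_training Node_List pos_points neg_points
      = (PySem.List.pyRange 0 (Node_List.length : Int) 1).map (pvColorOf pos_points neg_points) := by
  unfold color_list_training
  have h : (fun (color_list : List String) (x : Int) =>
      if x ∈ pos_points then color_list ++ ["red"]
      else if x ∈ neg_points then color_list ++ ["green"]
      else color_list ++ ["blue"])
      = fun color_list x => color_list ++ [pvColorOf pos_points neg_points x] := by
    funext acc x
    unfold pvColorOf
    split_ifs <;> rfl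
  rw [h, foldl_append_singleton]
  simp

theorem getElem?_pvSetColor (l : List String) (p : Int) (c : String) (i : Nat) :
    (pvSetColor l p c)[i]? = if (i : Int) = p then l[i]?.map (fun _ => c) else l[i]? := by
  unfold pvSetColor
  by_cases hip : (i : Int) = p
  · subst hip
    by_cases hr : 0 ≤ (i : Int) ∧ (i : Int) < (l.length : Int)
    · simp only [if_pos hr, Int.toNat_natCast]
      have hlt : i < l.length := by exact_mod_cast hr.2
      simp [hlt, List.getElem?_eq_getElem hlt]
    · have hge : l.length ≤ i := by omega
      have hnl : ¬ i < l.length := by omega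
      simp [hnl, List.getElem?_eq_none hge]
  · split
    · next hr =>
      have hne : p.toNat ≠ i := by omega
      simp [List.getElem?_set_ne hne, hip]
    · simp [hip]

theorem getElem?_scatter (ps : List Int) (c : String) (l : List String) (i : Nat) :
    (ps.foldl (fun l p => pvSetColor l p c) l)[i]?
      = if (i : Int) ∈ ps then l[i]?.map (fun _ => c) else l[i]? := by
  induction ps generalizing l with
  | nil => simp
  | cons p t ih =>
    simp only [List.foldl_cons, ih, getElem?_pvSetColor, List.mem_cons]
    by_cases hm : (i : Int) ∈ t
    · by_cases hp : (i : Int) = p <;> simp [hm, hp, Option.map_map, Function.comp_def]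
    · by_cases hp : (i : Int) = p
      · subst hp
        simp [hm, Option.map_map, Function.comp_def]
      · simp [hm, hp]

theorem portB_eq_map (Node_List : List Int) (pos_points : List Int) (neg_points : List Int) :
    color_list_training_alt Node_List pos_points neg_points
      = (PySem.List.pyRange 0 (Node_List.length : Int) 1).map (pvColorOf pos_points neg_points) := by
  apply List.ext_getElem?
  intro i
  unfold color_list_training_alt
  simp only [getElem?_scatter]
  rw [PySem.List.pyRange_zero_nat]
  by_cases hlt : i < Node_List.length
  · have hrep : (List.replicate Node_List.length "blue")[i]? = some "blue" := by
      simp [List.getElem?_replicate, hlt]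
    have hmap : ((List.range Node_List.length).map (fun k : Nat => (k : Int)))[i]? = some (i : Int) := by
      simp [List.getElem?_map, List.getElem?_range hlt]
    rw [List.getElem?_map, hmap]
    simp only [hrep, Option.map_some]
    unfold pvColorOf
    split_ifs <;> rfl
  · have h1 : (List.replicate Node_List.length "blue")[i]? = none := by
      simp [List.getElem?_replicate]; omega
    have h2 : (((List.range Node_List.length).map (fun k : Nat => (k : Int))).map
        (pvColorOf pos_points neg_points))[i]? = none := by
      apply List.getElem?_eq_none; simpa using Nat.le_of_not_lt hlt
    rw [h2, h1]
    split_ifs <;> simp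

-- ===== VERDICT (by name: the statement is the Claim_ definition above) =====
theorem color_list_training_spec : Claim_equal_color_list_training := by
  intro Node_List pos_points neg_points _
  unfold Spec_color_list_training
  rw [portA_eq_map, portB_eq_map]
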